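-- pv_equiv track=rewrite | github.com/Bgzdl/Multi-model-NER | utils.py | calculate_org_accuracy
-- ===== SOURCE A (Python) =====
-- def calculate_org_accuracy(gold_named_entity, pred_named_entity):
--     correct_predictions = 0
--     total_pred_entities = 0
--     total_gold_entities = 0
--
--     # 遍历预测的命名实体
--     for word, predicted_entity in pred_named_entity.items():
--         if predicted_entity == 'ORG':
--             total_pred_entities += 1
--         # 检查该单词是否在真实标注中且实体类型匹配
--             if word in gold_named_entity and predicted_entity == gold_named_entity[word]:
--                 correct_predictions += 1
--     for word, gold_entity in gold_named_entity.items():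
--         if gold_entity == 'ORG':
--             total_gold_entities += 1
--     return correct_predictions, total_pred_entities, total_gold_entities
-- ===== SOURCE B (Python) =====
-- def calculate_org_accuracy(gold_named_entity, pred_named_entity):
--     # sort the ORG keys of each dict and count the intersection with a two-pointer merge
--     pred_keys = sorted(w for w, e in pred_named_entity.items() if e == 'ORG')
--     gold_keys = sorted(w for w, e in gold_named_entity.items() if e == 'ORG')
--     correct = 0
--     i = 0
--     j = 0
--     while i < len(pred_keys) and j < len(gold_keys):
--         if pred_keys[i] == gold_keys[j]:
--             correct += 1
--             i += 1
--             j += 1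
--         elif pred_keys[i] < gold_keys[j]:
--             i += 1
--         else:
--             j += 1
--     return correct, len(pred_keys), len(gold_keys)
-- ===== Notes on version B (the rewrite author's own statement) =====
-- stated objective: alternative
-- what changed: Replaces A's scan-with-inline-dict-lookup counting loops by sorting the ORG keys of each dict and counting matches with a two-pointer sorted-merge intersection.
import Mathlib
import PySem

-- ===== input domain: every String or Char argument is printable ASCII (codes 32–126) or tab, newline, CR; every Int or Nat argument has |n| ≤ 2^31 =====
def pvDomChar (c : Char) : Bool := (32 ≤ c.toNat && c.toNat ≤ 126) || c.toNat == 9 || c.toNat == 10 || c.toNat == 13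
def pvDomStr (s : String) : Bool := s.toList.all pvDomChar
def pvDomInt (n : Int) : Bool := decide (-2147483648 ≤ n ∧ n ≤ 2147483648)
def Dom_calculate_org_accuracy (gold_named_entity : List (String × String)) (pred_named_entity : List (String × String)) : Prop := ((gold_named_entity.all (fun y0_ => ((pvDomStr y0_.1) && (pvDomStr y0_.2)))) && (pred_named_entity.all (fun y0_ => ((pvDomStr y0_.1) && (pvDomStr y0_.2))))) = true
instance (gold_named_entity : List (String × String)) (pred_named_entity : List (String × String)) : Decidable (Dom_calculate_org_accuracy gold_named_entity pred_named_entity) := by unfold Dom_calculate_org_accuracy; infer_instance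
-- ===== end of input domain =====

-- B sorts the ORG keys of each dict and counts matches by a two-pointer sorted-merge
-- intersection, instead of A's scan with an inline dict lookup.

-- ===== PORT A =====
def calculate_org_accuracy (gold_named_entity : List (String × String)) (pred_named_entity : List (String × String)) : Int × Int × Int :=
  let gold : PySem.Dict String String := PySem.Dict.mk gold_named_entity
  let s := pred_named_entity.foldl (fun (s : Int × Int) wp =>
    if wp.2 == "ORG" then
      let s := (s.1, s.2 + 1)
      if gold.contains wp.1 && (gold.get? wp.1 == some wp.2) then (s.1 + 1, s.2) else s
    else s) (0, 0)
  let total_gold := gold_named_entity.foldl (fun (t : Int) wg => if wg.2 == "ORG" then t + 1 else t) 0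
  (s.1, s.2, total_gold)

-- ===== PORT B =====
-- the two-pointer while loop, transcribed as recursion on the two sorted lists
def pvMergeCount : List String → List String → Int
  | [], _ => 0
  | _ :: _, [] => 0
  | x :: xs, y :: ys =>
    if x == y then 1 + pvMergeCount xs ys
    else if x < y then pvMergeCount xs (y :: ys)
    else pvMergeCount (x :: xs) ys
termination_by xs ys => xs.length + ys.length

def calculate_org_accuracy_alt (gold_named_entity : List (String × String)) (pred_named_entity : List (String × String)) : Int × Int × Int :=
  let pred_keys := PySem.List.sorted ((pred_named_entity.filter (fun wp => wp.2 == "ORG")).map Prod.fst) (fun x => x) false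
  let gold_keys := PySem.List.sorted ((gold_named_entity.filter (fun wp => wp.2 == "ORG")).map Prod.fst) (fun x => x) false
  (pvMergeCount pred_keys gold_keys, (pred_keys.length : Int), (gold_keys.length : Int))

-- ===== PRECONDITION & SPEC =====
-- Pre_ states that the two association lists represent Python dicts, i.e. have pairwise
-- distinct keys; every input the Python A accepts is a dict, so no Python input is excluded.
def Pre_calculate_org_accuracy (gold_named_entity : List (String × String)) (pred_named_entity : List (String × String)) : Prop :=
  (gold_named_entity.map Prod.fst).Nodup ∧ (pred_named_entity.map Prod.fst).Nodup
instance (gold_named_entity : List (String × String)) (pred_named_entity : List (String × String)) : Decidable (Pre_calculate_org_accuracy gold_named_entity pred_named_entity) := by unfold Pre_calculate_org_accuracy; infer_instance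
def pvWitness_calculate_org_accuracy : (List (String × String)) × (List (String × String)) :=
  ([("acme", "ORG"), ("bob", "PER")], [("acme", "ORG"), ("x", "ORG")])
def Spec_calculate_org_accuracy (gold_named_entity : List (String × String)) (pred_named_entity : List (String × String)) (out : Int × Int × Int) : Prop := out = calculate_org_accuracy_alt gold_named_entity pred_named_entity
instance (gold_named_entity : List (String × String)) (pred_named_entity : List (String × String)) (out : Int × Int × Int) : Decidable (Spec_calculate_org_accuracy gold_named_entity pred_named_entity out) := by unfold Spec_calculate_org_accuracy; infer_instance

-- ===== CLAIM (what is proved, stated in full; the proofs are below) =====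
def Claim_equal_calculate_org_accuracy : Prop := ∀ (gold_named_entity : List (String × String)) (pred_named_entity : List (String × String)), Dom_calculate_org_accuracy gold_named_entity pred_named_entity → Pre_calculate_org_accuracy gold_named_entity pred_named_entity → Spec_calculate_org_accuracy gold_named_entity pred_named_entity (calculate_org_accuracy gold_named_entity pred_named_entity)

-- ===== LEMMAS AND PROOFS =====

theorem pv_foldA (gold : PySem.Dict String String) (pred : List (String × String)) (c tp : Int) :
    pred.foldl (fun (s : Int × Int) wp =>
      if wp.2 == "ORG" then
        let s := (s.1, s.2 + 1)
        if gold.contains wp.1 && (gold.get? wp.1 == some wp.2) then (s.1 + 1, s.2) else s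
      else s) (c, tp)
    = (c + (pred.countP (fun wp => wp.2 == "ORG" && (gold.contains wp.1 && (gold.get? wp.1 == some wp.2))) : Int),
       tp + (pred.countP (fun wp => wp.2 == "ORG") : Int)) := by
  induction pred generalizing c tp with
  | nil => simp
  | cons hd tl ih =>
    rw [List.foldl_cons]
    by_cases h1 : hd.2 == "ORG"
    · by_cases h2 : gold.contains hd.1 && (gold.get? hd.1 == some hd.2)
      · simp only [h1, h2, eq_self_iff_true, if_true]
        rw [ih]
        simp only [List.countP_cons, h1, h2, Bool.and_self, Bool.true_and, if_true,
          eq_self_iff_true, Prod.mk.injEq]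
        push_cast
        omega
      · simp only [h1, h2, eq_self_iff_true, if_true, if_false, iff_false]
        rw [ih]
        simp only [List.countP_cons, h1, h2, Bool.true_and, if_false, iff_false,
          eq_self_iff_true, if_true, Prod.mk.injEq]
        push_cast
        omega
    · simp only [h1, if_false, iff_false]
      rw [ih]
      simp only [List.countP_cons, h1, Bool.false_and, if_false, iff_false, Prod.mk.injEq]
      push_cast
      omega

theorem pv_foldG (gold : List (String × String)) (t : Int) :
    gold.foldl (fun (t : Int) wg => if wg.2 == "ORG" then t + 1 else t) t
    = t + (gold.countP (fun wg => wg.2 == "ORG") : Int) := by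
  induction gold generalizing t with
  | nil => simp
  | cons hd tl ih =>
    rw [List.foldl_cons]
    by_cases h : hd.2 == "ORG"
    · simp only [h, eq_self_iff_true, if_true]
      rw [ih]
      simp only [List.countP_cons, h, eq_self_iff_true, if_true]
      push_cast
      omega
    · simp only [h, if_false, iff_false]
      rw [ih]
      simp only [List.countP_cons, h, if_false, iff_false]
      push_cast
      omega

-- with nodup keys, lookup returns "ORG" iff the key occurs among the ORG-filtered keys
theorem pv_get_org (gold : List (String × String)) (h : (gold.map Prod.fst).Nodup) (w : String) :
    ((PySem.Dict.mk gold).get? w = some "ORG")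
      ↔ w ∈ (gold.filter (fun wp => wp.2 == "ORG")).map Prod.fst := by
  induction gold with
  | nil => simp [PySem.Dict.get?]
  | cons hd tl ih =>
    simp only [List.map_cons, List.nodup_cons] at h
    rw [PySem.Dict.get?_mk_cons]
    by_cases hk : hd.1 == w
    · have hkw : hd.1 = w := by simpa using hk
      by_cases ho : hd.2 == "ORG"
      · have : hd.2 = "ORG" := by simpa using ho
        simp [hkw, this]
      · have hne : hd.2 ≠ "ORG" := by simpa using ho
        simp only [hk, if_pos rfl, List.filter_cons, ho]
        constructor
        · intro hc; exact absurd (by simpa using hc) hne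
        · intro hc
          exfalso
          apply h.1
          rw [hkw]
          rcases List.mem_map.mp hc with ⟨p, hp, hpe⟩
          exact hpe ▸ List.mem_map_of_mem (List.mem_of_mem_filter hp)
    · have hne : hd.1 ≠ w := by simpa using hk
      rw [if_neg hk, ih h.2]
      by_cases ho : hd.2 == "ORG" <;> simp [ho, Ne.symm hne]

theorem pv_filter_map_nodup (l : List (String × String)) (h : (l.map Prod.fst).Nodup)
    (p : String × String → Bool) : ((l.filter p).map Prod.fst).Nodup :=
  List.Nodup.sublist (List.Sublist.map Prod.fst List.filter_sublist) h

-- on strictly increasing lists the merge counts the intersection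
theorem pv_merge_count (xs ys : List String) (hx : xs.Pairwise (· < ·)) (hy : ys.Pairwise (· < ·)) :
    pvMergeCount xs ys = (xs.countP (fun w => decide (w ∈ ys)) : Int) := by
  induction hn : xs.length + ys.length using Nat.strong_induction_on generalizing xs ys with
  | _ n ih =>
  rcases xs with _ | ⟨x, xs⟩
  · simp [pvMergeCount]
  rcases ys with _ | ⟨y, ys⟩
  · simp [pvMergeCount]
  have hx1 : ∀ a ∈ xs, x < a := fun a ha => List.rel_of_pairwise_cons hx ha
  have hx2 := hx.of_cons
  have hy1 : ∀ a ∈ ys, y < a := fun a ha => List.rel_of_pairwise_cons hy ha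
  have hy2 := hy.of_cons
  rw [pvMergeCount]
  by_cases hxy : x == y
  · have hxy' : x = y := by simpa using hxy
    rw [if_pos hxy, ih (xs.length + ys.length) (by simp at hn; omega) xs ys hx2 hy2 rfl]
    have hc : xs.countP (fun w => decide (w ∈ y :: ys)) = xs.countP (fun w => decide (w ∈ ys)) := by
      apply List.countP_congr
      intro w hw
      have hne : w ≠ y := (hxy' ▸ hx1 w hw).ne'
      simp [List.mem_cons, hne]
    rw [List.countP_cons, hc]
    simp only [hxy', List.mem_cons, true_or, decide_true, if_pos rfl, reduceIte]
    push_cast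
    omega
  · rw [if_neg hxy]
    have hne : x ≠ y := by simpa using hxy
    by_cases hlt : x < y
    · rw [if_pos hlt, ih (xs.length + (y :: ys).length) (by simp at hn ⊢; omega) xs (y :: ys) hx2 hy rfl]
      have hnx : x ∉ y :: ys := by
        intro hmem
        rcases List.mem_cons.mp hmem with h | h
        · exact hne h
        · exact absurd (lt_trans hlt (hy1 x h)) (lt_irrefl x)
      rw [List.countP_cons]
      simp [hnx]
    · have hgt : y < x := lt_of_le_of_ne (not_lt.mp hlt) (Ne.symm hne)
      rw [if_neg hlt, ih ((x :: xs).length + ys.length) (by simp at hn ⊢; omega) (x :: xs) ys hx hy2 rfl]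
      apply congrArg
      apply List.countP_congr
      intro w hw
      have hyw : y < w := by
        rcases List.mem_cons.mp hw with h | h
        · exact h ▸ hgt
        · exact lt_trans hgt (hx1 w h)
      simp [List.mem_cons, hyw.ne']

theorem pv_sorted_strict (l : List String) (h : l.Nodup) :
    (PySem.List.sorted l (fun x => x) false).Pairwise (· < ·) := by
  have hle := PySem.List.sorted_pairwise (xs := l) (key := fun x => x)
  have hnd : (PySem.List.sorted l (fun x => x) false).Nodup :=
    (PySem.List.sorted_perm l (fun x => x) false).nodup_iff.mpr h
  exact (hle.and hnd).imp (fun hab => lt_of_le_of_ne hab.1 hab.2)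

theorem calculate_org_accuracy_spec' (gold pred : List (String × String))
    (hg : (gold.map Prod.fst).Nodup) (hp : (pred.map Prod.fst).Nodup) :
    calculate_org_accuracy gold pred = calculate_org_accuracy_alt gold pred := by
  unfold calculate_org_accuracy calculate_org_accuracy_alt
  simp only [pv_foldA, pv_foldG]
  set pk := (pred.filter (fun wp => wp.2 == "ORG")).map Prod.fst with hpk
  set gk := (gold.filter (fun wp => wp.2 == "ORG")).map Prod.fst with hgk
  have hpn : pk.Nodup := pv_filter_map_nodup pred hp _
  have hgn : gk.Nodup := pv_filter_map_nodup gold hg _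
  rw [pv_merge_count _ _ (pv_sorted_strict pk hpn) (pv_sorted_strict gk hgn)]
  refine Prod.ext ?_ (Prod.ext ?_ ?_)
  · -- correct predictions
    simp only [zero_add]
    apply congrArg
    rw [List.Perm.countP_eq _ (PySem.List.sorted_perm pk (fun x => x) false)]
    have hcnt : pk.countP (fun w => decide (w ∈ PySem.List.sorted gk (fun x => x) false))
        = pk.countP (fun w => decide (w ∈ gk)) := by
      apply List.countP_congr
      intro w _
      simp [PySem.List.mem_sorted]
    rw [hcnt, hpk, List.countP_map, List.countP_filter]
    apply List.countP_congr
    intro wp _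
    simp only [Function.comp, Bool.and_eq_true, beq_iff_eq, decide_eq_true_eq,
      PySem.Dict.contains_eq_isSome_get?]
    constructor
    · rintro ⟨ho, -, hg2⟩
      exact ⟨(pv_get_org gold hg wp.1).mp (ho ▸ hg2), ho⟩
    · rintro ⟨hmem, ho⟩
      have hgo := (pv_get_org gold hg wp.1).mpr hmem
      exact ⟨ho, by simp [hgo], ho ▸ hgo⟩
  · simp [PySem.List.length_sorted, hpk, List.countP_eq_length_filter]
  · simp [PySem.List.length_sorted, hgk, List.countP_eq_length_filter]

-- ===== VERDICT (by name: the statement is the Claim_ definition above) =====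
theorem calculate_org_accuracy_spec : Claim_equal_calculate_org_accuracy := by
  intro gold pred _ hpre
  exact calculate_org_accuracy_spec' gold pred hpre.1 hpre.2
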